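-- pv_equiv track=rewrite | github.com/ShakedTayouri/gene-edit-distance | code/ged_flow/score_calculator/SequenceAlignment.py | sequence_alignment
-- ===== SOURCE A (Python) =====
-- def sequence_alignment(sequence1, sequence2):
--     match = 0
--     mismatch = 0
--     gaps_opened = 0
--     gaps_extended = 0
--     is_last_char_gap = False
--
--     for i in range(min(len(sequence1), len(sequence2))):
--         if sequence1[i] == sequence2[i]:
--             match += 1
--             is_last_char_gap = False
--         elif sequence1[i] == '-' or sequence2[i] == '-':
--             if not is_last_char_gap:
--                 gaps_opened += 1
--                 is_last_char_gap = True
--             else: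
--                 gaps_extended += 1
--         else:
--             mismatch += 1
--             is_last_char_gap = False
--
--     return match, mismatch, gaps_opened, gaps_extended
-- ===== SOURCE B (Python) =====
-- def sequence_alignment(sequence1, sequence2):
--     cats = ''.join('M' if a == b else
--                    'G' if a == '-' or b == '-' else
--                    'X'
--                    for a, b in zip(sequence1, sequence2))
--     gaps_opened = sum(1 for prev, c in zip('.' + cats, cats)
--                       if c == 'G' and prev != 'G')
--     return cats.count('M'), cats.count('X'), gaps_opened, cats.count('G') - gaps_opened
-- ===== Notes on version B (the rewrite author's own statement) =====
-- stated objective: alternative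
-- what changed: Replaces the stateful single loop (is_last_char_gap flag) by first mapping each position to a category string M/G/X, then computing the four counts from that string: match/mismatch/gap totals via count(), gap openings by pairing each category with its predecessor.
import Mathlib
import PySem

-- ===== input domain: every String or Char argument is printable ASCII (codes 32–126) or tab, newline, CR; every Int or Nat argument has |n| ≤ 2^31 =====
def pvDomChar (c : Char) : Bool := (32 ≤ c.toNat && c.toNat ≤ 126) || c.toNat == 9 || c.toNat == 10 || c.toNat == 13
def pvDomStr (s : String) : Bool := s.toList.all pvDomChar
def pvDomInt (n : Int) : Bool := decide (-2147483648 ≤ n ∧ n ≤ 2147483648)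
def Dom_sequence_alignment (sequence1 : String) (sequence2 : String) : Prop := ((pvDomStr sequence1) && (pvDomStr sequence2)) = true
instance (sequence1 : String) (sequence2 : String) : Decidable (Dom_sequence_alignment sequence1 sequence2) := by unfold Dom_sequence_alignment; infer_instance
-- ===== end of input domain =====

-- B replaces A's stateful flag loop by a category string (M/G/X per position) whose
-- counts, plus a predecessor-pairing for gap openings, give the four statistics (alternative decomposition, same cost).

-- ===== PORT A =====
-- A's for-loop over i in range(min(len,len)) accessing sequence1[i], sequence2[i]
-- becomes structural recursion over the zipped character pairs with the same state.
def pvLoopA : List (Char × Char) → Int → Int → Int → Int → Bool → Int × Int × Int × Int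
  | [], m, x, go, ge, _ => (m, x, go, ge)
  | (a, b) :: t, m, x, go, ge, flag =>
    if a == b then pvLoopA t (m + 1) x go ge false
    else if a == '-' || b == '-' then
      if !flag then pvLoopA t m x (go + 1) ge true
      else pvLoopA t m x go (ge + 1) flag
    else pvLoopA t m (x + 1) go ge false

def sequence_alignment (sequence1 : String) (sequence2 : String) : Int × Int × Int × Int :=
  pvLoopA (List.zip sequence1.toList sequence2.toList) 0 0 0 0 false

-- ===== PORT B =====
def pvCat (a b : Char) : Char :=
  if a == b then 'M' else if a == '-' || b == '-' then 'G' else 'X'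

def sequence_alignment_alt (sequence1 : String) (sequence2 : String) : Int × Int × Int × Int :=
  let cats : List Char :=
    (List.zip sequence1.toList sequence2.toList).map (fun p => pvCat p.1 p.2)
  let gaps_opened : Int :=
    (List.zip ('.' :: cats) cats).foldl
      (fun acc p => if p.2 == 'G' && p.1 != 'G' then acc + 1 else acc) 0
  ((cats.count 'M' : Int), (cats.count 'X' : Int), gaps_opened,
    (cats.count 'G' : Int) - gaps_opened)

-- ===== PRECONDITION & SPEC =====
def Spec_sequence_alignment (sequence1 : String) (sequence2 : String) (out : Int × Int × Int × Int) : Prop := out = sequence_alignment_alt sequence1 sequence2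
instance (sequence1 : String) (sequence2 : String) (out : Int × Int × Int × Int) : Decidable (Spec_sequence_alignment sequence1 sequence2 out) := by unfold Spec_sequence_alignment; infer_instance

-- ===== CLAIM (what is proved, stated in full; the proofs are below) =====
def Claim_equal_sequence_alignment : Prop := ∀ (sequence1 : String) (sequence2 : String), Dom_sequence_alignment sequence1 sequence2 → Spec_sequence_alignment sequence1 sequence2 (sequence_alignment sequence1 sequence2)

-- ===== LEMMAS AND PROOFS =====

-- number of gap-run openings in a category list, given whether the previous position was a gap
def pvOpens : Bool → List Char → Int
  | _, [] => 0
  | g, c :: cs => (if c == 'G' && !g then 1 else 0) + pvOpens (c == 'G') cs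

theorem pvFoldB_eq (cs : List Char) : ∀ (p : Char) (acc : Int),
    (List.zip (p :: cs) cs).foldl
      (fun acc q => if q.2 == 'G' && q.1 != 'G' then acc + 1 else acc) acc
    = acc + pvOpens (p == 'G') cs := by
  induction cs with
  | nil => intro p acc; simp [pvOpens]
  | cons c cs ih =>
    intro p acc
    show (List.foldl _ _ ((p, c) :: List.zip (c :: cs) cs)) = _
    simp only [List.foldl_cons, ih, pvOpens]
    by_cases h : (c == 'G') = true <;> by_cases h2 : (p == 'G') = true <;>
      simp [h, h2, bne] <;> ring

theorem pvLoopA_eq (l : List (Char × Char)) : ∀ (m x go ge : Int) (flag : Bool),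
    pvLoopA l m x go ge flag =
      (m + ((l.map (fun p => pvCat p.1 p.2)).count 'M' : Int),
       x + ((l.map (fun p => pvCat p.1 p.2)).count 'X' : Int),
       go + pvOpens flag (l.map (fun p => pvCat p.1 p.2)),
       ge + (((l.map (fun p => pvCat p.1 p.2)).count 'G' : Int)
              - pvOpens flag (l.map (fun p => pvCat p.1 p.2)))) := by
  induction l with
  | nil => intro m x go ge flag; simp [pvLoopA, pvOpens]
  | cons hd t ih =>
    obtain ⟨a, b⟩ := hd
    intro m x go ge flag
    by_cases hab : (a == b) = true
    · simp only [pvLoopA, hab, if_true, ih, List.map_cons, pvCat, List.count_cons,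
        pvOpens, Prod.mk.injEq]
      push_cast
      refine ⟨?_, ?_, ?_, ?_⟩ <;> simp <;> ring
    · by_cases hg : (a == '-' || b == '-') = true
      · cases flag with
        | false =>
          simp only [pvLoopA, hab, hg, if_true, if_false, Bool.false_eq_true,
            Bool.not_false, ih, List.map_cons, pvCat, List.count_cons, pvOpens,
            Prod.mk.injEq]
          push_cast
          refine ⟨?_, ?_, ?_, ?_⟩ <;> simp <;> ring
        | true =>
          simp only [pvLoopA, hab, hg, if_true, if_false, Bool.false_eq_true,
            Bool.not_true, ih, List.map_cons, pvCat, List.count_cons, pvOpens,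
            Prod.mk.injEq]
          push_cast
          refine ⟨?_, ?_, ?_, ?_⟩ <;> simp <;> ring
      · simp only [pvLoopA, hab, hg, if_false, Bool.false_eq_true, ih,
          List.map_cons, pvCat, List.count_cons, pvOpens, Prod.mk.injEq]
        push_cast
        refine ⟨?_, ?_, ?_, ?_⟩ <;> simp <;> ring

-- ===== VERDICT (by name: the statement is the Claim_ definition above) =====
theorem sequence_alignment_spec : Claim_equal_sequence_alignment := by
  intro s1 s2 _
  unfold Spec_sequence_alignment sequence_alignment sequence_alignment_alt
  rw [pvLoopA_eq]
  simp only [pvFoldB_eq]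
  simp
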